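-- pv_equiv track=rewrite | github.com/wyf15927690137/learning | learnpy/OperateFiles/copyCases.py | getCaseName
-- ===== SOURCE A (Python) =====
-- def getCaseName(casePath):
--     s = ""
--     # iterate a string reversely
--     for x in reversed(casePath):
--         if x != '\\':
--             s = x + s
--         else:
--             break
--     return s
-- ===== SOURCE B (Python) =====
-- def getCaseName(casePath):
--     idx = casePath.rfind('\\')
--     return casePath[idx + 1:]
-- ===== Notes on version B (the rewrite author's own statement) =====
-- stated objective: simpler
-- what changed: Replaced the reverse character-by-character accumulation loop with computing the index of the last backslash via rfind and returning one slice from idx+1 (rfind's -1 on absence makes the slice the whole string); both O(n), but B runs in C-level builtins instead of a per-character Python loop.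
import Mathlib
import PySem

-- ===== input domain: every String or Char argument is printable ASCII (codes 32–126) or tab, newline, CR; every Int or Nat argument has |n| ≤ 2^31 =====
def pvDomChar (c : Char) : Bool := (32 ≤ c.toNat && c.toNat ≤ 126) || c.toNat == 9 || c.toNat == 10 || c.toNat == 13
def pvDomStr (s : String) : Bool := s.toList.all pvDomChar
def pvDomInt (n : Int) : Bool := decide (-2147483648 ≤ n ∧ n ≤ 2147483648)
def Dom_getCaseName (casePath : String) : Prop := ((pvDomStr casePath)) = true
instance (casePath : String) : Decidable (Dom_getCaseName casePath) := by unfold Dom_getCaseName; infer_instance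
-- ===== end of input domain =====

-- B replaces A's reverse character-accumulation loop by rfind of the last backslash plus one slice (simpler decomposition).


-- ===== PORT A =====
-- for x in reversed(casePath): if x != '\\': s = x + s  else: break; return s
-- (the accumulator string s is kept as a List Char, 'x + s' = x :: acc)
def getCaseNameLoopA : List Char → List Char → List Char
  | [], acc => acc
  | x :: xs, acc => if x ≠ '\\' then getCaseNameLoopA xs (x :: acc) else acc

def getCaseName (casePath : String) : String :=
  String.ofList (getCaseNameLoopA casePath.toList.reverse [])

-- ===== PORT B =====
def getCaseName_alt (casePath : String) : String :=
  let idx := PySem.Str.rfind casePath "\\"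
  PySem.Str.slice casePath (some (idx + 1)) none

-- ===== PRECONDITION & SPEC =====
def Spec_getCaseName (casePath : String) (out : String) : Prop := out = getCaseName_alt casePath
instance (casePath : String) (out : String) : Decidable (Spec_getCaseName casePath out) := by unfold Spec_getCaseName; infer_instance

-- ===== CLAIM (what is proved, stated in full; the proofs are below) =====
def Claim_equal_getCaseName : Prop := ∀ (casePath : String), Dom_getCaseName casePath → Spec_getCaseName casePath (getCaseName casePath)

-- ===== LEMMAS AND PROOFS =====

-- A's loop accumulates the backslash-free suffix, reversed back.
theorem loopA_eq (r acc : List Char) :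
    getCaseNameLoopA r acc = (r.takeWhile (· ≠ '\\')).reverse ++ acc := by
  induction r generalizing acc with
  | nil => simp [getCaseNameLoopA]
  | cons x xs ih =>
    by_cases hx : x = '\\'
    · simp [getCaseNameLoopA, hx, List.takeWhile]
    · simp [getCaseNameLoopA, hx, List.takeWhile, ih]

theorem go_neg_one_le (l sub : List Char) (n : Nat) :
    -1 ≤ PySem.Chars.rfind.go l sub n := by
  induction n with
  | zero => simp [PySem.Chars.rfind.go]; split <;> omega
  | succ m ih => simp [PySem.Chars.rfind.go]; split <;> omega

theorem go_le (l sub : List Char) (n : Nat) :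
    PySem.Chars.rfind.go l sub n ≤ n := by
  induction n with
  | zero => simp [PySem.Chars.rfind.go]; split <;> omega
  | succ m ih => simp [PySem.Chars.rfind.go]; split <;> omega

-- equation lemmas for the rfind scan loop
theorem go_zero (l sub : List Char) :
    PySem.Chars.rfind.go l sub 0 = if sub.isPrefixOf l then 0 else -1 := by
  simp [PySem.Chars.rfind.go]

theorem go_succ (l sub : List Char) (n : Nat) :
    PySem.Chars.rfind.go l sub (n + 1)
      = if sub.isPrefixOf (l.drop (n + 1)) then ((n : Int) + 1)
        else PySem.Chars.rfind.go l sub n := by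
  simp [PySem.Chars.rfind.go]

-- shrinking the scanned range below the list length ignores an appended element (single-char pattern)
theorem go_append (l : List Char) (c : Char) (n : Nat) (h : n < l.length) :
    PySem.Chars.rfind.go (l ++ [c]) ['\\'] n = PySem.Chars.rfind.go l ['\\'] n := by
  induction n with
  | zero =>
    have hl : l ≠ [] := by intro h0; simp [h0] at h
    obtain ⟨y, ys, rfl⟩ := List.exists_cons_of_ne_nil hl
    simp [go_zero, List.isPrefixOf]
  | succ m ih =>
    have hdrop : (l ++ [c]).drop (m + 1) = l.drop (m + 1) ++ [c] :=
      List.drop_append_of_le_length (by omega)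
    have hne : l.drop (m + 1) ≠ [] := by
      intro h0
      have := List.length_drop (l := l) (i := m + 1)
      rw [h0] at this; simp at this; omega
    obtain ⟨y, ys, hys⟩ := List.exists_cons_of_ne_nil hne
    rw [go_succ, go_succ, hdrop, hys, ih (by omega)]
    simp [List.isPrefixOf]

theorem rfind_drop (l : List Char) :
    l.drop (PySem.Chars.rfind l ['\\'] + 1).toNat
      = (l.reverse.takeWhile (· ≠ '\\')).reverse := by
  induction l using List.reverseRecOn with
  | nil => simp [PySem.Chars.rfind, go_zero, List.isPrefixOf]
  | append_singleton l c ih =>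
    by_cases hc : c = '\\'
    · subst hc
      have hr : PySem.Chars.rfind (l ++ ['\\']) ['\\'] = (l.length : Int) := by
        cases l with
        | nil => decide
        | cons y ys =>
          simp only [PySem.Chars.rfind, List.length_append, List.length_cons,
            List.length_nil, Nat.zero_add]
          rw [go_succ, go_succ]
          have h1 : ((y :: ys) ++ ['\\']).drop (ys.length + 1 + 1) = [] := by
            apply List.drop_of_length_le; simp
          have h2 : ((y :: ys) ++ ['\\']).drop (ys.length + 1) = ['\\'] := by
            simp
          simp [List.isPrefixOf]
      rw [hr]
      have ht : ((l.length : Int) + 1).toNat = l.length + 1 := by omega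
      simp [ht]
    · have hstep : PySem.Chars.rfind (l ++ [c]) ['\\'] = PySem.Chars.rfind l ['\\'] := by
        cases l with
        | nil =>
          simp only [PySem.Chars.rfind, List.nil_append, List.length_cons,
            List.length_nil]
          rw [go_succ, go_zero, go_zero]
          simp [List.isPrefixOf, Ne.symm hc]
        | cons y ys =>
          simp only [PySem.Chars.rfind, List.length_append, List.length_cons,
            List.length_nil, Nat.zero_add]
          rw [go_succ, go_succ, go_succ]
          have h1 : ((y :: ys) ++ [c]).drop (ys.length + 1 + 1) = [] := by
            apply List.drop_of_length_le; simp
          have h2 : ((y :: ys) ++ [c]).drop (ys.length + 1) = [c] := by simp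
          have h3 : (y :: ys).drop (ys.length + 1) = [] := by
            apply List.drop_of_length_le; simp
          rw [h1, h2, h3, go_append (y :: ys) c ys.length (by simp)]
          simp [List.isPrefixOf, Ne.symm hc]
      rw [hstep]
      have hub : PySem.Chars.rfind l ['\\'] + 1 ≤ (l.length : Int) := by
        cases l with
        | nil => decide
        | cons y ys =>
          have h3 : (y :: ys).drop (ys.length + 1) = [] := by
            apply List.drop_of_length_le; simp
          simp only [PySem.Chars.rfind, List.length_cons]
          rw [go_succ, h3]
          have h2 := go_le (y :: ys) ['\\'] ys.length
          simp [List.isPrefixOf]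
          omega
      have hb := go_neg_one_le l ['\\'] l.length
      have hb' : -1 ≤ PySem.Chars.rfind l ['\\'] := hb
      have hk : (PySem.Chars.rfind l ['\\'] + 1).toNat ≤ l.length := by omega
      rw [List.drop_append_of_le_length hk, ih]
      simp [hc]

-- ===== VERDICT (by name: the statement is the Claim_ definition above) =====
theorem getCaseName_spec : Claim_equal_getCaseName := by
  intro s _
  unfold Spec_getCaseName getCaseName getCaseName_alt
  rw [loopA_eq]
  have hbs : ("\\".toList) = ['\\'] := rfl
  have hnn : 0 ≤ PySem.Str.rfind s "\\" + 1 := by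
    have := go_neg_one_le s.toList ['\\'] s.toList.length
    simp only [PySem.Str.rfind, hbs, PySem.Chars.rfind]
    omega
  rw [PySem.Str.slice]
  simp only [PySem.Chars.slice]
  rw [PySem.List.slice_from _ hnn]
  simp only [PySem.Str.rfind, hbs]
  rw [rfind_drop s.toList]
  simp
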